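-- pv_equiv track=rewrite | github.com/HiSeungmin/algorithm_study | Stack/P2.py | solution
-- ===== SOURCE A (Python) =====
-- import math
--
-- def solution(progresses, speeds):
--     t = []
--
--     # 첫 번째 작업의 배포 일수를 올바르게 계산
--     t.append(math.ceil((100 - progresses[0]) / speeds[0]))
--
--     for i in range(1, len(progresses)):
--         num = math.ceil((100 - progresses[i]) / speeds[i])  # 배포 일수 올림 적용
--         t.append(max(num, t[i-1]))  # 앞의 작업보다 더 오래 걸릴 경우 보정
--
--     result = []
--     num = 1
--     for i in range(len(t) - 1):
--         if t[i] != t[i + 1]: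
--             result.append(num)
--             num = 1
--         else:
--             num += 1
--     result.append(num)
--     return result
-- ===== SOURCE B (Python) =====
-- import math
--
-- def solution(progresses, speeds):
--     # single greedy pass: track the current batch's release day instead of
--     # building the corrected-days array and scanning it again
--     front = math.ceil((100 - progresses[0]) / speeds[0])
--     count = 1
--     result = []
--     for p, s in zip(progresses[1:], speeds[1:]):
--         d = math.ceil((100 - p) / s)
--         if d <= front:
--             count += 1
--         else:
--             result.append(count)
--             front = d
--             count = 1
--     result.append(count)
--     return result
-- ===== Notes on version B (the rewrite author's own statement) =====
-- stated objective: simpler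
-- what changed: B replaces A's two-pass scheme (build the corrected finish-day array with a running max, then scan it again counting runs of equal values) by a single greedy pass that tracks only the current batch's release day and count.
import Mathlib
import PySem

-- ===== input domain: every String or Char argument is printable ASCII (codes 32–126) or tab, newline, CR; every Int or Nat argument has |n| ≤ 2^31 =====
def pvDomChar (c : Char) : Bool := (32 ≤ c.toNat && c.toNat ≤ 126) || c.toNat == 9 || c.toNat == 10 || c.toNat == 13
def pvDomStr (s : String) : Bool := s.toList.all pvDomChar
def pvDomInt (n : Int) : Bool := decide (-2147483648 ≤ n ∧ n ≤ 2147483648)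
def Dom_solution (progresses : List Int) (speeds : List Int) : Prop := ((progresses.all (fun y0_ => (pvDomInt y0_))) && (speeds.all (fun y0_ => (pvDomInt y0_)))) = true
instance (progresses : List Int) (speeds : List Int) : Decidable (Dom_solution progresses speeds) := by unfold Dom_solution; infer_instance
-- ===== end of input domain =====

-- B replaces A's two passes (corrected-days array, then run-length scan) by one greedy pass
-- keeping only the current batch's release day and count (objective: simpler).

-- ===== PORT A =====
-- math.ceil((100 - p) / s) : on Dom (|int| ≤ 2^31) the float division is exact enough that
-- math.ceil of it equals the exact rational ceiling -((-a) // s) (checked exhaustively at random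
-- over the domain); ported as exact integer ceiling division.
def pvCeilDiv (a b : Int) : Int := -(PySem.Int.floordiv (-a) b)

def pvStepA (progresses speeds : List Int) (t : List Int) (i : Int) : List Int :=
  let num := pvCeilDiv (100 - PySem.List.pyGetD progresses i 0) (PySem.List.pyGetD speeds i 0)
  t ++ [max num (PySem.List.pyGetD t (i - 1) 0)]

def pvStepA2 (t : List Int) (st : List Int × Int) (i : Int) : List Int × Int :=
  if PySem.List.pyGetD t i 0 ≠ PySem.List.pyGetD t (i + 1) 0 then (st.1 ++ [st.2], 1)
  else (st.1, st.2 + 1)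

def solution (progresses : List Int) (speeds : List Int) : List Int :=
  let t0 : List Int := [pvCeilDiv (100 - PySem.List.pyGetD progresses 0 0) (PySem.List.pyGetD speeds 0 0)]
  let t := (PySem.List.pyRange 1 (progresses.length : Int) 1).foldl (pvStepA progresses speeds) t0
  let fin := (PySem.List.pyRange 0 ((t.length : Int) - 1) 1).foldl (pvStepA2 t) ([], 1)
  fin.1 ++ [fin.2]

-- ===== PORT B =====
-- state = (front, count, result); xs[1:] is List.drop 1 xs (exact)
def pvStepB (st : Int × Int × List Int) (ps : Int × Int) : Int × Int × List Int :=
  let d := pvCeilDiv (100 - ps.1) ps.2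
  if d ≤ st.1 then (st.1, st.2.1 + 1, st.2.2) else (d, 1, st.2.2 ++ [st.2.1])

def solution_alt (progresses : List Int) (speeds : List Int) : List Int :=
  let front := pvCeilDiv (100 - PySem.List.pyGetD progresses 0 0) (PySem.List.pyGetD speeds 0 0)
  let st := ((progresses.drop 1).zip (speeds.drop 1)).foldl pvStepB (front, 1, [])
  st.2.2 ++ [st.2.1]

-- ===== PRECONDITION & SPEC =====
-- Exactly where Python A returns: nonempty progresses (else IndexError on progresses[0]),
-- speeds at least as long as progresses (else IndexError on speeds[i]), and no zero among the
-- accessed speeds (else ZeroDivisionError).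
def Pre_solution (progresses : List Int) (speeds : List Int) : Prop :=
  progresses ≠ [] ∧ progresses.length ≤ speeds.length ∧
    ∀ x ∈ speeds.take progresses.length, x ≠ 0
instance (progresses : List Int) (speeds : List Int) : Decidable (Pre_solution progresses speeds) := by
  unfold Pre_solution; infer_instance

def pvWitness_solution : List Int × List Int := ([93, 30, 55], [1, 30, 5])

def Spec_solution (progresses : List Int) (speeds : List Int) (out : List Int) : Prop :=
  out = solution_alt progresses speeds
instance (progresses : List Int) (speeds : List Int) (out : List Int) :
    Decidable (Spec_solution progresses speeds out) := by unfold Spec_solution; infer_instance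

-- ===== CLAIM (what is proved, stated in full; the proofs are below) =====
def Claim_equal_solution : Prop := ∀ (progresses : List Int) (speeds : List Int),
  Dom_solution progresses speeds → Pre_solution progresses speeds →
    Spec_solution progresses speeds (solution progresses speeds)

-- ===== LEMMAS AND PROOFS =====

-- the corrected finish-day list A's first loop builds, as a structural scan
def pvTScan (c : Int) : List (Int × Int) → List Int
  | [] => [c]
  | (p, s) :: r => c :: pvTScan (max (pvCeilDiv (100 - p) s) c) r

-- A's second loop (run-length counting over adjacent equal entries), structurally
def pvRuns : List Int → List Int → Int → List Int
  | [], res, num => res ++ [num]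
  | [_], res, num => res ++ [num]
  | x :: y :: r, res, num =>
      if x ≠ y then pvRuns (y :: r) (res ++ [num]) 1 else pvRuns (y :: r) res (num + 1)

-- B's loop, structurally
def pvBuildB : List (Int × Int) → Int → Int → List Int → List Int
  | [], _, count, res => res ++ [count]
  | (p, s) :: r, front, count, res =>
      let d := pvCeilDiv (100 - p) s
      if d ≤ front then pvBuildB r front (count + 1) res else pvBuildB r d 1 (res ++ [count])

lemma pvTScan_head (r : List (Int × Int)) (c : Int) : ∃ rest, pvTScan c r = c :: rest := by
  cases r with
  | nil => exact ⟨[], rfl⟩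
  | cons q r => exact ⟨pvTScan (max (pvCeilDiv (100 - q.1) q.2) c) r, rfl⟩

lemma pvBuildB_eq_foldl (l : List (Int × Int)) :
    ∀ front count res,
      (l.foldl pvStepB (front, count, res)).2.2 ++ [(l.foldl pvStepB (front, count, res)).2.1]
        = pvBuildB l front count res := by
  induction l with
  | nil => intro front count res; rfl
  | cons q r ih =>
      intro front count res
      obtain ⟨p, s⟩ := q
      simp only [List.foldl_cons, pvStepB, pvBuildB]
      by_cases h : pvCeilDiv (100 - p) s ≤ front
      · simp only [if_pos h]; exact ih front (count + 1) res
      · simp only [if_neg h]; exact ih (pvCeilDiv (100 - p) s) 1 (res ++ [count])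

lemma pvRuns_tScan (pairs : List (Int × Int)) :
    ∀ c res num, pvRuns (pvTScan c pairs) res num = pvBuildB pairs c num res := by
  induction pairs with
  | nil => intro c res num; rfl
  | cons q r ih =>
      intro c res num
      obtain ⟨p, s⟩ := q
      obtain ⟨rest, hrest⟩ := pvTScan_head r (max (pvCeilDiv (100 - p) s) c)
      simp only [pvTScan, hrest, pvRuns, pvBuildB]
      by_cases h : pvCeilDiv (100 - p) s ≤ c
      · have hmax : max (pvCeilDiv (100 - p) s) c = c := by omega
        rw [hmax] at hrest ⊢
        simp only [if_pos h, ne_eq, not_true_eq_false, if_false]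
        rw [← hrest]; exact ih c res (num + 1)
      · have hmax : max (pvCeilDiv (100 - p) s) c = pvCeilDiv (100 - p) s := by omega
        have hne : c ≠ pvCeilDiv (100 - p) s := by omega
        rw [hmax] at hrest ⊢
        simp only [if_neg h, ne_eq, hne, not_false_eq_true, if_true]
        rw [← hrest]; exact ih (pvCeilDiv (100 - p) s) (res ++ [num]) 1

lemma pvLoopA (prog spd : List Int) (hlen : prog.length ≤ spd.length) :
    ∀ (j k : Nat) (pre : List Int) (c : Int),
      k + j = prog.length → 1 ≤ k → pre.length + 1 = k →
      (PySem.List.pyRange (k : Int) (prog.length : Int) 1).foldl (pvStepA prog spd) (pre ++ [c])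
        = pre ++ pvTScan c ((prog.drop k).zip (spd.drop k)) := by
  intro j
  induction j with
  | zero =>
      intro k pre c h1 h2 h3
      have hk : k = prog.length := by omega
      subst hk
      rw [PySem.List.pyRange_one_eq_nil (le_refl _)]
      simp [List.drop_length, pvTScan]
  | succ j ih =>
      intro k pre c h1 h2 h3
      have hk : (k : Int) < (prog.length : Int) := by exact_mod_cast (by omega : k < prog.length)
      have hkp : k < prog.length := by omega
      have hks : k < spd.length := by omega
      rw [PySem.List.pyRange_one_cons hk]
      simp only [List.foldl_cons]
      have hstep : pvStepA prog spd (pre ++ [c]) (k : Int)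
          = (pre ++ [c]) ++ [max (pvCeilDiv (100 - prog[k]) spd[k]) c] := by
        have hip : PySem.List.pyGetD prog (k : Int) 0 = prog[k] := by
          rw [PySem.List.pyGetD_natCast]; exact List.getD_eq_getElem prog 0 hkp
        have his : PySem.List.pyGetD spd (k : Int) 0 = spd[k] := by
          rw [PySem.List.pyGetD_natCast]; exact List.getD_eq_getElem spd 0 hks
        have hidx : (k : Int) - 1 = ((k - 1 : Nat) : Int) := by omega
        have hlastlt : k - 1 < (pre ++ [c]).length := by simp; omega
        have hlast : PySem.List.pyGetD (pre ++ [c]) ((k : Int) - 1) 0 = c := by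
          rw [hidx, PySem.List.pyGetD_natCast, List.getD_eq_getElem _ 0 hlastlt]
          have hpl : k - 1 = pre.length := by omega
          simp [hpl]
        simp only [pvStepA, hip, his, hlast]
      rw [hstep]
      have hdropP : prog.drop k = prog[k] :: prog.drop (k + 1) := (List.getElem_cons_drop hkp).symm
      have hdropS : spd.drop k = spd[k] :: spd.drop (k + 1) := (List.getElem_cons_drop hks).symm
      rw [hdropP, hdropS, List.zip_cons_cons]
      show _ = pre ++ (c :: pvTScan (max (pvCeilDiv (100 - prog[k]) spd[k]) c)
        ((prog.drop (k + 1)).zip (spd.drop (k + 1))))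
      have hcast : (k : Int) + 1 = ((k + 1 : Nat) : Int) := by push_cast; ring
      rw [hcast]
      rw [ih (k + 1) (pre ++ [c]) (max (pvCeilDiv (100 - prog[k]) spd[k]) c)
        (by omega) (by omega) (by simp; omega)]
      simp

lemma pvLoopA2 (T : List Int) :
    ∀ (j k : Nat) (res : List Int) (num : Int), k + j + 1 = T.length →
      ((PySem.List.pyRange (k : Int) ((T.length : Int) - 1) 1).foldl (pvStepA2 T) (res, num)).1
          ++ [((PySem.List.pyRange (k : Int) ((T.length : Int) - 1) 1).foldl (pvStepA2 T) (res, num)).2]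
        = pvRuns (T.drop k) res num := by
  intro j
  induction j with
  | zero =>
      intro k res num h
      rw [PySem.List.pyRange_one_eq_nil (by omega)]
      have hk : k < T.length := by omega
      have : T.drop k = T[k] :: T.drop (k + 1) := (List.getElem_cons_drop hk).symm
      rw [this, List.drop_eq_nil_of_le (by omega)]
      rfl
  | succ j ih =>
      intro k res num h
      have hk1 : k < T.length := by omega
      have hk2 : k + 1 < T.length := by omega
      rw [PySem.List.pyRange_one_cons (by omega)]
      simp only [List.foldl_cons]
      have hi : PySem.List.pyGetD T (k : Int) 0 = T[k] := by
        rw [PySem.List.pyGetD_natCast]; exact List.getD_eq_getElem T 0 hk1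
      have hcast : (k : Int) + 1 = ((k + 1 : Nat) : Int) := by push_cast; ring
      have hi1 : PySem.List.pyGetD T ((k : Int) + 1) 0 = T[k + 1] := by
        rw [hcast, PySem.List.pyGetD_natCast]; exact List.getD_eq_getElem T 0 hk2
      have hd0 : T.drop k = T[k] :: T.drop (k + 1) := (List.getElem_cons_drop hk1).symm
      have hd1 : T.drop (k + 1) = T[k + 1] :: T.drop (k + 2) := (List.getElem_cons_drop hk2).symm
      rw [hd0, hd1]
      simp only [pvStepA2, hi, hi1]
      by_cases hne : T[k] ≠ T[k + 1]
      · simp only [pvRuns, if_pos hne]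
        rw [← hd1, hcast]; exact ih (k + 1) (res ++ [num]) 1 (by omega)
      · simp only [pvRuns, if_neg hne]
        rw [← hd1, hcast]; exact ih (k + 1) res (num + 1) (by omega)

-- ===== VERDICT (by name: the statement is the Claim_ definition above) =====
theorem solution_spec : Claim_equal_solution := by
  intro prog spd _ hpre
  obtain ⟨hne, hlen, _⟩ := hpre
  have hn : 1 ≤ prog.length := List.length_pos_of_ne_nil hne
  unfold Spec_solution
  simp only [solution, solution_alt]
  set c0 := pvCeilDiv (100 - PySem.List.pyGetD prog 0 0) (PySem.List.pyGetD spd 0 0) with hc0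
  have h1 : (PySem.List.pyRange ((1 : Nat) : Int) (prog.length : Int) 1).foldl
      (pvStepA prog spd) ([] ++ [c0])
      = [] ++ pvTScan c0 ((prog.drop 1).zip (spd.drop 1)) :=
    pvLoopA prog spd hlen (prog.length - 1) 1 [] c0 (by omega) (by omega) (by simp)
  simp only [List.nil_append] at h1
  have h1' : (PySem.List.pyRange (1 : Int) (prog.length : Int) 1).foldl
      (pvStepA prog spd) [c0] = pvTScan c0 ((prog.drop 1).zip (spd.drop 1)) := by
    exact_mod_cast h1
  rw [h1']
  set T := pvTScan c0 ((prog.drop 1).zip (spd.drop 1)) with hT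
  obtain ⟨rest, hrest⟩ := pvTScan_head ((prog.drop 1).zip (spd.drop 1)) c0
  have hTlen : 1 ≤ T.length := by rw [hT, hrest]; simp
  have h2 : ((PySem.List.pyRange ((0 : Nat) : Int) ((T.length : Int) - 1) 1).foldl
        (pvStepA2 T) ([], 1)).1
      ++ [((PySem.List.pyRange ((0 : Nat) : Int) ((T.length : Int) - 1) 1).foldl
        (pvStepA2 T) ([], 1)).2]
      = pvRuns (T.drop 0) [] 1 :=
    pvLoopA2 T (T.length - 1) 0 [] 1 (by omega)
  simp only [List.drop_zero, Nat.cast_zero] at h2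
  rw [h2, hT, pvRuns_tScan]
  rw [← pvBuildB_eq_foldl]
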